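-- pv_equiv track=rewrite | github.com/mathigatti/midi2voice | lyrics_tokenizer.py | extendWord
-- ===== SOURCE A (Python) =====
-- def extendWord(text):
-- 	for extensibleEnding in ["a","e","i","o","u","ad","as","at"]:
-- 		if text.endswith(extensibleEnding):
-- 			if len(extensibleEnding) > 1:
-- 				return text[:-1], extensibleEnding
-- 			else:
-- 				return text, extensibleEnding
-- 	return text, None
-- ===== SOURCE B (Python) =====
-- # Classify the word by its last one- and two-character slices via set lookup,
-- # instead of scanning a list of candidate suffixes with endswith.
-- _TWO = {"ad", "as", "at"}
-- _ONE = {"a", "e", "i", "o", "u"}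
--
-- def extendWord(text):
-- 	tail2 = text[-2:]
-- 	if tail2 in _TWO:
-- 		return text[:-1], tail2
-- 	tail1 = text[-1:]
-- 	if tail1 in _ONE:
-- 		return text, tail1
-- 	return text, None
-- ===== Notes on version B (the rewrite author's own statement) =====
-- stated objective: alternative
-- what changed: Instead of scanning a candidate-suffix list with endswith, B slices off the last two / last one characters once and classifies the word by set membership of those slices (a precomputed suffix table), checking the two-character table first since the tables are disjoint.
import Mathlib
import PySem

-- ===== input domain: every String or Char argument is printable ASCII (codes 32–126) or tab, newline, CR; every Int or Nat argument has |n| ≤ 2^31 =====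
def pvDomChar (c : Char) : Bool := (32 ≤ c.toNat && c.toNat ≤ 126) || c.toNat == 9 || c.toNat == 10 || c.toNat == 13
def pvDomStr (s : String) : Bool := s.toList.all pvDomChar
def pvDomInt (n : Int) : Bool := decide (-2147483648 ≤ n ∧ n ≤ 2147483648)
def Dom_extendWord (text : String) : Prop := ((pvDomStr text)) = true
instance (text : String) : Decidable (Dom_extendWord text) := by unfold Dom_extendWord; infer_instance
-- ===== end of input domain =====

-- B slices the last two / last one characters and classifies them by membership in fixed suffix tables,
-- instead of scanning a candidate-suffix list with endswith: an alternative decomposition, same results.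

-- ===== PORT A =====
-- the for-loop over the literal suffix list, one recursive step per iteration
def extendWordGo (text : String) : List String → String × Option String
  | [] => (text, none)
  | e :: rest =>
    if PySem.Str.endswith text e then
      if 1 < PySem.Str.len e then
        (PySem.Str.slice text none (some (-1)), some e)
      else
        (text, some e)
    else extendWordGo text rest

def extendWord (text : String) : String × Option String :=
  extendWordGo text ["a", "e", "i", "o", "u", "ad", "as", "at"]

-- ===== PORT B =====
-- the module-level suffix tables _TWO and _ONE of Source B
def pvTwoEndings : PySem.Set String := PySem.Set.ofList ["ad", "as", "at"]
def pvOneEndings : PySem.Set String := PySem.Set.ofList ["a", "e", "i", "o", "u"]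

-- tail2 = text[-2:], tail1 = text[-1:]; membership tests are Set.contains
def extendWord_alt (text : String) : String × Option String :=
  let tail2 := PySem.Str.slice text (some (-2)) none
  if PySem.Set.contains pvTwoEndings tail2 then
    (PySem.Str.slice text none (some (-1)), some tail2)
  else
    let tail1 := PySem.Str.slice text (some (-1)) none
    if PySem.Set.contains pvOneEndings tail1 then
      (text, some tail1)
    else
      (text, none)

-- ===== PRECONDITION & SPEC =====
def Spec_extendWord (text : String) (out : String × Option String) : Prop := out = extendWord_alt text
instance (text : String) (out : String × Option String) : Decidable (Spec_extendWord text out) := by unfold Spec_extendWord; infer_instance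

-- ===== CLAIM (what is proved, stated in full; the proofs are below) =====
def Claim_equal_extendWord : Prop := ∀ (text : String), Dom_extendWord text → Spec_extendWord text (extendWord text)

-- ===== LEMMAS AND PROOFS =====

theorem suffix_one (m : List Char) (c x : Char) : ([x] <:+ m ++ [c]) ↔ x = c := by
  constructor
  · rintro ⟨t, ht⟩
    have hl : t.length = m.length := by have := congrArg List.length ht; simp at this; omega
    simpa using (List.append_inj ht hl).2
  · rintro rfl; exact ⟨m, rfl⟩

theorem suffix_two (m : List Char) (b c x y : Char) : ([x,y] <:+ m ++ [b,c]) ↔ (x = b ∧ y = c) := by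
  constructor
  · rintro ⟨t, ht⟩
    have hl : t.length = m.length := by have := congrArg List.length ht; simp at this; omega
    simpa using (List.append_inj ht hl).2
  · rintro ⟨rfl, rfl⟩; exact ⟨m, by simp⟩

theorem suffix_single (c x : Char) : ([x] <:+ [c]) ↔ x = c := by
  simpa using suffix_one [] c x

theorem suffix_two_single (c x y : Char) : ¬ ([x,y] <:+ [c]) := by
  rintro ⟨t, ht⟩
  have := congrArg List.length ht; simp at this

theorem memTwo (l : List Char) :
    String.ofList l ∈ pvTwoEndings ↔ l = ['a','d'] ∨ l = ['a','s'] ∨ l = ['a','t'] := by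
  rw [pvTwoEndings, PySem.Set.mem_ofList]
  simp only [List.mem_cons, List.not_mem_nil, or_false, ← String.toList_inj,
    String.toList_ofList]
  exact Iff.rfl

theorem memOne (l : List Char) :
    String.ofList l ∈ pvOneEndings ↔
      l = ['a'] ∨ l = ['e'] ∨ l = ['i'] ∨ l = ['o'] ∨ l = ['u'] := by
  rw [pvOneEndings, PySem.Set.mem_ofList]
  simp only [List.mem_cons, List.not_mem_nil, or_false, ← String.toList_inj,
    String.toList_ofList]
  exact Iff.rfl

theorem key (l : List Char) : extendWord (String.ofList l) = extendWord_alt (String.ofList l) := by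
  rcases hr : l.reverse with _ | ⟨c, rest⟩
  · have : l = [] := by simpa using congrArg List.reverse hr
    subst this; decide
  · rcases rest with _ | ⟨b, m⟩
    · have hl : l = [c] := by have := congrArg List.reverse hr; simpa using this
      subst hl
      have htail2 : PySem.Str.slice (String.ofList [c]) (some (-2)) none = String.ofList [c] := by
        apply String.toList_inj.mp
        simp [PySem.List.slice]
      have htail1 : PySem.Str.slice (String.ofList [c]) (some (-1)) none = String.ofList [c] := by
        apply String.toList_inj.mp
        simp [PySem.List.slice]
      simp only [extendWord, extendWordGo, extendWord_alt, PySem.Str.endswith_eq,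
        String.toList_ofList, htail2, htail1]
      have hno2 : String.ofList [c] ∉ pvTwoEndings := by
        simp [memTwo]
      by_cases ha : c = 'a' <;> by_cases he : c = 'e' <;> by_cases hi : c = 'i' <;>
        by_cases ho : c = 'o' <;> by_cases hu : c = 'u' <;>
        simp_all [PySem.Chars.endswith_iff, suffix_single, suffix_two_single, memOne] <;>
        first
        | decide
        | simp [Ne.symm ha, Ne.symm he, Ne.symm hi, Ne.symm ho, Ne.symm hu]
    · have hl : l = m.reverse ++ [b, c] := by
        have := congrArg List.reverse hr; simpa using this
      subst hl
      have htail2 : PySem.Str.slice (String.ofList (m.reverse ++ [b, c])) (some (-2)) none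
          = String.ofList [b, c] := by
        apply String.toList_inj.mp
        simp [PySem.List.slice_from_neg_ofNat _ 2 (by omega)]
      have htail1 : PySem.Str.slice (String.ofList (m.reverse ++ [b, c])) (some (-1)) none
          = String.ofList [c] := by
        apply String.toList_inj.mp
        simp only [PySem.Str.toList_slice, String.toList_ofList]
        rw [show PySem.Chars.slice (m.reverse ++ [b, c]) (some (-1))
              = List.drop ((m.reverse ++ [b, c]).length - 1) (m.reverse ++ [b, c]) from
            PySem.List.slice_from_neg_one _,
          show (m.reverse ++ [b, c]).length - 1 = m.reverse.length + 1 from by simp,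
          List.drop_append]
        simp
      have hsuf1 : ∀ x : Char, ([x] <:+ m.reverse ++ [b, c]) ↔ c = x := by
        intro x
        have := suffix_one (m.reverse ++ [b]) c x
        simp only [List.append_assoc, List.cons_append, List.nil_append] at this
        rw [this, eq_comm]
      have hsuf2 : ∀ x y : Char, ([x, y] <:+ m.reverse ++ [b, c]) ↔ b = x ∧ c = y := by
        intro x y
        rw [suffix_two, eq_comm (a := x), eq_comm (a := y)]
      simp only [extendWord, extendWordGo, extendWord_alt, PySem.Str.endswith_eq,
        String.toList_ofList, htail2, htail1]
      have t1 : ("a" : String).toList = ['a'] := rfl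
      have t2 : ("e" : String).toList = ['e'] := rfl
      have t3 : ("i" : String).toList = ['i'] := rfl
      have t4 : ("o" : String).toList = ['o'] := rfl
      have t5 : ("u" : String).toList = ['u'] := rfl
      have t6 : ("ad" : String).toList = ['a', 'd'] := rfl
      have t7 : ("as" : String).toList = ['a', 's'] := rfl
      have t8 : ("at" : String).toList = ['a', 't'] := rfl
      have la : ¬ (1 < PySem.Str.len "a") := by decide
      have le : ¬ (1 < PySem.Str.len "e") := by decide
      have li : ¬ (1 < PySem.Str.len "i") := by decide
      have lo : ¬ (1 < PySem.Str.len "o") := by decide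
      have lu : ¬ (1 < PySem.Str.len "u") := by decide
      have lad : 1 < PySem.Str.len "ad" := by decide
      have las : 1 < PySem.Str.len "as" := by decide
      have lat : 1 < PySem.Str.len "at" := by decide
      simp only [t1, t2, t3, t4, t5, t6, t7, t8, PySem.Chars.endswith_iff, hsuf1, hsuf2,
        if_neg la, if_neg le, if_neg li, if_neg lo, if_neg lu, if_pos lad, if_pos las, if_pos lat,
        PySem.Set.contains_iff, memTwo, memOne]
      split_ifs <;> simp_all
      tauto

-- ===== VERDICT (by name: the statement is the Claim_ definition above) =====
theorem extendWord_spec : Claim_equal_extendWord := by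
  intro text _
  unfold Spec_extendWord
  have h := key text.toList
  simpa [String.ofList_toList] using h
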